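-- pv_equiv track=rewrite | github.com/divnomorskoe1989/VoiceInput | voice_input_app.py | _skip_n_words_in_original
-- ===== SOURCE A (Python) =====
-- def _skip_n_words_in_original(text: str, word_count: int) -> tuple[str, int]:
--     """Skip first N words in text (by word boundaries), return remainder and offset."""
--     fi = 0
--     words_skipped = 0
--     in_word = False
--     while fi < len(text) and words_skipped < word_count:
--         is_wc = text[fi].isalnum() or text[fi] == '_'
--         if is_wc and not in_word:
--             in_word = True
--         elif not is_wc and in_word:
--             words_skipped += 1
--             in_word = False
--         fi += 1
--     if in_word:
--         words_skipped += 1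
--     while fi < len(text) and not (text[fi].isalnum() or text[fi] == '_'):
--         fi += 1
--     if words_skipped >= word_count:
--         return text[fi:], fi
--     return text, 0
-- ===== SOURCE B (Python) =====
-- def _skip_n_words_in_original(text: str, word_count: int) -> tuple[str, int]:
--     """Skip first N words in text (by word boundaries), return remainder and offset."""
--     def wc(ch):
--         return ch.isalnum() or ch == '_'
--     starts = [i for i, (p, c) in enumerate(zip(' ' + text, text)) if wc(c) and not wc(p)]
--     n = max(word_count, 0)
--     if len(starts) < n:
--         return text, 0
--     offset = starts[n] if n < len(starts) else len(text)
--     return text[offset:], offset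
-- ===== Notes on version B (the rewrite author's own statement) =====
-- stated objective: idiomatic
-- what changed: B replaces A's per-character boundary state machine (two while loops with in_word/words_skipped state) by building the list of word-start positions once (zip each character with its predecessor) and then just comparing/indexing into that list, with non-positive counts clamped to 0.
import Mathlib
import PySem

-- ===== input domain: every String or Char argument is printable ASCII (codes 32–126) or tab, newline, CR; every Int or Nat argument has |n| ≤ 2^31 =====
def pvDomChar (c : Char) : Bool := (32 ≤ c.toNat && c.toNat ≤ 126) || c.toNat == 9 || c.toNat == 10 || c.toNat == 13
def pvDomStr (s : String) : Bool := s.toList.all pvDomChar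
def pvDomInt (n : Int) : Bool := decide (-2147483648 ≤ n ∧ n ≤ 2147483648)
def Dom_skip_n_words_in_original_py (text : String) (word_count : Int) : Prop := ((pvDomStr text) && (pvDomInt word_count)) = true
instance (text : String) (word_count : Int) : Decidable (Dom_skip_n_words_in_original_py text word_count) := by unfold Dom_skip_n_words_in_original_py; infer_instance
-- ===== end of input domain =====

-- B builds the list of word-start positions once and indexes into it, instead of A's per-character boundary state machine; same O(n) cost, more idiomatic.


-- ===== PORT A =====
-- shared word-character predicate: `ch.isalnum() or ch == '_'`
def pvAWC (c : Char) : Bool := PySem.Chars.isalnum c || c == '_'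

-- A's first while loop; the scanned suffix of the text is carried alongside the index fi
def pvALoop1 : List Char → Nat → Nat → Bool → Int → List Char × Nat × Nat × Bool
  | [], fi, ws, inw, _ => ([], fi, ws, inw)
  | c :: rest, fi, ws, inw, n =>
    if (ws : Int) < n then
      let iswc := pvAWC c
      if iswc && !inw then pvALoop1 rest (fi+1) ws true n
      else if !iswc && inw then pvALoop1 rest (fi+1) (ws+1) false n
      else pvALoop1 rest (fi+1) ws inw n
    else (c :: rest, fi, ws, inw)

-- A's second while loop (skip non-word characters)
def pvALoop2 : List Char → Nat → List Char × Nat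
  | [], fi => ([], fi)
  | c :: rest, fi => if !pvAWC c then pvALoop2 rest (fi+1) else (c :: rest, fi)

def skip_n_words_in_original_py (text : String) (word_count : Int) : String × Int :=
  match pvALoop1 text.toList 0 0 false word_count with
  | (rest₁, fi₁, ws₁, inw) =>
    let ws₂ := if inw then ws₁ + 1 else ws₁
    match pvALoop2 rest₁ fi₁ with
    | (rest₂, fi₂) =>
      -- text[fi:] is the carried suffix rest₂
      if word_count ≤ (ws₂ : Int) then (String.mk rest₂, (fi₂ : Int)) else (text, 0)

-- ===== PORT B =====
def skip_n_words_in_original_py_alt (text : String) (word_count : Int) : String × Int :=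
  let cs := text.toList
  -- starts = [i for i, (p, c) in enumerate(zip(' ' + text, text)) if wc(c) and not wc(p)]
  let starts := ((PySem.List.enumerate ((' ' :: cs).zip cs) 0).filter
      (fun q => pvAWC q.2.2 && !pvAWC q.2.1)).map (·.1)
  let n := max word_count 0
  if (starts.length : Int) < n then (text, 0)
  else
    -- starts[n] (index known in range here) / len(text)
    let offset := if n < (starts.length : Int) then (PySem.List.pyGet? starts n).getD 0
                  else (cs.length : Int)
    (String.mk (PySem.List.slice cs (some offset) none), offset)

-- ===== PRECONDITION & SPEC =====
def Spec_skip_n_words_in_original_py (text : String) (word_count : Int) (out : String × Int) : Prop := out = skip_n_words_in_original_py_alt text word_count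
instance (text : String) (word_count : Int) (out : String × Int) : Decidable (Spec_skip_n_words_in_original_py text word_count out) := by unfold Spec_skip_n_words_in_original_py; infer_instance

-- ===== CLAIM (what is proved, stated in full; the proofs are below) =====
def Claim_equal_skip_n_words_in_original_py : Prop := ∀ (text : String) (word_count : Int), Dom_skip_n_words_in_original_py text word_count → Spec_skip_n_words_in_original_py text word_count (skip_n_words_in_original_py text word_count)

-- ===== LEMMAS AND PROOFS =====

-- word-start positions of l, given whether the previous character was a word character
def pvWS (prev : Bool) (i : Nat) : List Char → List Nat
  | [] => []
  | c :: rest => if pvAWC c && !prev then i :: pvWS (pvAWC c) (i+1) rest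
                 else pvWS (pvAWC c) (i+1) rest

theorem pvWS_getD_ge (l : List Char) (prev : Bool) (i j : Nat) :
    i ≤ (pvWS prev i l).getD j (i + l.length) := by
  induction l generalizing prev i j with
  | nil => simp [pvWS]
  | cons c r ih =>
    simp only [pvWS, List.length_cons]
    by_cases h : (pvAWC c && !prev) = true
    · rw [if_pos h]
      cases j with
      | zero => simp
      | succ j =>
        simp only [List.getD_cons_succ]
        have hd : i + (r.length + 1) = (i + 1) + r.length := by omega
        rw [hd]
        have := ih (pvAWC c) (i+1) j
        omega
    · rw [if_neg h]
      have hd : i + (r.length + 1) = (i + 1) + r.length := by omega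
      rw [hd]
      have := ih (pvAWC c) (i+1) j
      omega

theorem pvALoop2_eq (l : List Char) (fi : Nat) :
    pvALoop2 l fi = (l.drop ((pvWS false fi l).getD 0 (fi + l.length) - fi),
                     (pvWS false fi l).getD 0 (fi + l.length)) := by
  induction l generalizing fi with
  | nil => simp [pvALoop2, pvWS]
  | cons c r ih =>
    by_cases hc : pvAWC c = true
    · simp [pvALoop2, pvWS, hc]
    · have hc' : pvAWC c = false := by simpa using hc
      have hW : pvWS false fi (c :: r) = pvWS false (fi+1) r := by
        simp [pvWS, hc']
      have hL : pvALoop2 (c :: r) fi = pvALoop2 r (fi+1) := by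
        simp [pvALoop2, hc']
      rw [hW, hL, ih (fi+1)]
      have hd : fi + (c :: r).length = (fi + 1) + r.length := by
        simp [List.length_cons]; omega
      rw [hd]
      have hge := pvWS_getD_ge r false (fi+1) 0
      have h1 : (pvWS false (fi+1) r).getD 0 ((fi+1) + r.length) - fi
          = ((pvWS false (fi+1) r).getD 0 ((fi+1) + r.length) - (fi+1)) + 1 := by omega
      rw [h1, List.drop_succ_cons]

theorem pvMain (n : Int) (l : List Char) :
    ∀ (fi ws : Nat) (inw : Bool), ((ws : Int) < n ∨ inw = false) →
    ((n ≤ ((if (pvALoop1 l fi ws inw n).2.2.2 then (pvALoop1 l fi ws inw n).2.2.1 + 1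
            else (pvALoop1 l fi ws inw n).2.2.1 : Nat) : Int)) ↔
       ¬(((pvWS inw fi l).length : Int) + (if inw then (1:Int) else 0) + ws < n)) ∧
    (¬(((pvWS inw fi l).length : Int) + (if inw then (1:Int) else 0) + ws < n) →
       pvALoop2 (pvALoop1 l fi ws inw n).1 (pvALoop1 l fi ws inw n).2.1 =
         (l.drop ((pvWS inw fi l).getD (n - ws - (if inw then (1:Int) else 0)).toNat (fi + l.length) - fi),
          (pvWS inw fi l).getD (n - ws - (if inw then (1:Int) else 0)).toNat (fi + l.length))) := by
  induction l with
  | nil =>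
    intro fi ws inw _
    constructor
    · cases inw <;> simp [pvALoop1, pvWS] <;> omega
    · intro h
      cases inw <;> simp [pvALoop1, pvALoop2, pvWS]
  | cons c r ih =>
    intro fi ws inw H
    by_cases hws : (ws : Int) < n
    · cases hc : pvAWC c <;> cases hin : inw
      -- (false, false): else-branch, stay out of word
      · simp only [pvALoop1, if_pos hws, hc, hin, Bool.false_and, Bool.not_false,
          Bool.and_false, Bool.and_true, if_neg, Bool.false_eq_true, not_false_eq_true,
          if_false]
        have hS : pvWS false fi (c :: r) = pvWS false (fi+1) r := by
          simp [pvWS, hc]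
        obtain ⟨ih1, ih2⟩ := ih (fi+1) ws false (Or.inr rfl)
        simp only [Bool.false_eq_true, if_false, if_true] at ih1 ih2 ⊢
        rw [hS]
        refine ⟨?_, ?_⟩
        · rw [ih1]
        · intro hcond
          have := ih2 hcond
          have hd : fi + (c :: r).length = (fi + 1) + r.length := by simp; omega
          rw [hd]
          have hge := pvWS_getD_ge r false (fi+1) (n - ↑ws - 0).toNat
          have h1 : (pvWS false (fi+1) r).getD (n - ↑ws - 0).toNat ((fi+1) + r.length) - fi
              = ((pvWS false (fi+1) r).getD (n - ↑ws - 0).toNat ((fi+1) + r.length) - (fi+1)) + 1 := by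
            omega
          rw [h1, List.drop_succ_cons]
          exact this
      -- (false, true): word ends here
      · simp only [pvALoop1, if_pos hws, hc, hin, Bool.false_and, Bool.not_true,
          Bool.and_false, Bool.not_false, Bool.true_and, if_neg, Bool.false_eq_true,
          not_false_eq_true, if_false, if_pos]
        have hS : pvWS true fi (c :: r) = pvWS false (fi+1) r := by
          simp [pvWS, hc]
        obtain ⟨ih1, ih2⟩ := ih (fi+1) (ws+1) false (Or.inr rfl)
        simp only [Bool.false_eq_true, if_false, if_true] at ih1 ih2 ⊢
        rw [hS]
        refine ⟨?_, ?_⟩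
        · rw [ih1]; push_cast; omega
        · intro hcond
          have hcond' : ¬(((pvWS false (fi+1) r).length : Int) + 0 + (ws+1) < n) := by
            push_cast at hcond ⊢; omega
          have := ih2 hcond'
          have hidx : (n - (↑(ws+1) : Int) - 0).toNat = (n - ↑ws - 1).toNat := by push_cast; omega
          rw [hidx] at this
          have hd : fi + (c :: r).length = (fi + 1) + r.length := by simp; omega
          rw [hd]
          have hge := pvWS_getD_ge r false (fi+1) (n - ↑ws - 1).toNat
          have h1 : (pvWS false (fi+1) r).getD (n - ↑ws - 1).toNat ((fi+1) + r.length) - fi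
              = ((pvWS false (fi+1) r).getD (n - ↑ws - 1).toNat ((fi+1) + r.length) - (fi+1)) + 1 := by
            omega
          rw [h1, List.drop_succ_cons]
          exact this
      -- (true, false): word starts here
      · simp only [pvALoop1, if_pos hws, hc, hin, Bool.true_and, Bool.not_false, if_pos]
        have hS : pvWS false fi (c :: r) = fi :: pvWS true (fi+1) r := by
          simp [pvWS, hc]
        obtain ⟨ih1, ih2⟩ := ih (fi+1) ws true (Or.inl hws)
        simp only [Bool.false_eq_true, if_false, if_true] at ih1 ih2 ⊢
        rw [hS]
        refine ⟨?_, ?_⟩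
        · rw [ih1]
          simp only [List.length_cons]
          push_cast
          constructor <;> intro <;> omega
        · intro hcond
          have hcond' : ¬(((pvWS true (fi+1) r).length : Int) + 1 + ws < n) := by
            simp only [List.length_cons] at hcond; push_cast at hcond ⊢; omega
          have := ih2 hcond'
          have hidx : (n - ↑ws - 0).toNat = (n - ↑ws - 1).toNat + 1 := by omega
          rw [hidx]
          simp only [List.getD_cons_succ]
          have hd : fi + (c :: r).length = (fi + 1) + r.length := by simp; omega
          rw [hd]
          have hge := pvWS_getD_ge r true (fi+1) (n - ↑ws - 1).toNat
          have h1 : (pvWS true (fi+1) r).getD (n - ↑ws - 1).toNat ((fi+1) + r.length) - fi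
              = ((pvWS true (fi+1) r).getD (n - ↑ws - 1).toNat ((fi+1) + r.length) - (fi+1)) + 1 := by
            omega
          rw [h1, List.drop_succ_cons]
          exact this
      -- (true, true): inside a word, keep going
      · simp only [pvALoop1, if_pos hws, hc, hin, Bool.true_and, Bool.not_true,
          Bool.and_false, Bool.false_and, if_neg, Bool.false_eq_true, not_false_eq_true,
          if_false]
        have hS : pvWS true fi (c :: r) = pvWS true (fi+1) r := by
          simp [pvWS, hc]
        obtain ⟨ih1, ih2⟩ := ih (fi+1) ws true (Or.inl hws)
        simp only [Bool.false_eq_true, if_false, if_true] at ih1 ih2 ⊢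
        rw [hS]
        refine ⟨?_, ?_⟩
        · rw [ih1]
        · intro hcond
          have := ih2 hcond
          have hd : fi + (c :: r).length = (fi + 1) + r.length := by simp; omega
          rw [hd]
          have hge := pvWS_getD_ge r true (fi+1) (n - ↑ws - 1).toNat
          have h1 : (pvWS true (fi+1) r).getD (n - ↑ws - 1).toNat ((fi+1) + r.length) - fi
              = ((pvWS true (fi+1) r).getD (n - ↑ws - 1).toNat ((fi+1) + r.length) - (fi+1)) + 1 := by
            omega
          rw [h1, List.drop_succ_cons]
          exact this
    · -- loop guard fails: ws ≥ n, hence inw = false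
      have hin : inw = false := H.resolve_left hws
      subst hin
      simp only [pvALoop1, if_neg hws, Bool.false_eq_true, if_false]
      refine ⟨?_, ?_⟩
      · have : (0:Int) ≤ ((pvWS false fi (c :: r)).length : Int) := by positivity
        constructor <;> intro <;> omega
      · intro _
        have hidx : (n - (ws:Int) - 0).toNat = 0 := by omega
        rw [hidx]
        exact pvALoop2_eq (c :: r) fi

theorem pvBStarts (cs : List Char) (p : Char) (i : Nat) :
    ((PySem.List.enumerate ((p :: cs).zip cs) (i : Int)).filter
        (fun q => pvAWC q.2.2 && !pvAWC q.2.1)).map (·.1)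
      = List.map (fun k : Nat => (k : Int)) (pvWS (pvAWC p) i cs) := by
  induction cs generalizing p i with
  | nil => simp [PySem.List.enumerate, pvWS]
  | cons c r ih =>
    have hz : (p :: c :: r).zip (c :: r) = (p, c) :: ((c :: r).zip r) := by
      simp [List.zip_cons_cons]
    rw [hz, PySem.List.enumerate_cons, List.filter_cons]
    have hcast : (i : Int) + 1 = ((i + 1 : Nat) : Int) := by push_cast; ring
    by_cases g : (pvAWC c && !pvAWC p) = true
    · rw [if_pos (by simpa using g), List.map_cons, hcast, ih c (i+1)]
      simp [pvWS, g]
    · rw [if_neg (by simpa using g), hcast, ih c (i+1)]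
      simp [pvWS, g]

-- ===== VERDICT (by name: the statement is the Claim_ definition above) =====
theorem skip_n_words_in_original_py_spec : Claim_equal_skip_n_words_in_original_py := by
  intro text n _dom
  unfold Spec_skip_n_words_in_original_py
  obtain ⟨hm1, hm2⟩ := pvMain n text.toList 0 0 false (Or.inr rfl)
  simp only [Bool.false_eq_true, if_false, Nat.cast_zero, sub_zero, add_zero, zero_add,
    Nat.zero_add, Nat.sub_zero] at hm1 hm2
  rcases hres : pvALoop1 text.toList 0 0 false n with ⟨r₁, f₁, w₁, i₁⟩
  rw [hres] at hm1 hm2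
  rcases hl2 : pvALoop2 r₁ f₁ with ⟨r₂, f₂⟩
  rw [hl2] at hm2
  have hstarts := pvBStarts text.toList ' ' 0
  rw [show pvAWC ' ' = false by decide] at hstarts
  simp only [Nat.cast_zero] at hstarts
  simp only [skip_n_words_in_original_py, skip_n_words_in_original_py_alt, hres, hl2,
    hstarts, List.length_map]
  set S := pvWS false 0 text.toList with hS
  by_cases hcond : ((S.length : Int) < n)
  · -- fewer words than requested: both return (text, 0)
    have hA : ¬ (n ≤ ((if i₁ then w₁ + 1 else w₁ : Nat) : Int)) := by
      rw [hm1]; simpa using hcond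
    rw [if_neg hA, if_pos (by omega : (S.length : Int) < max n 0)]
  · have hA : n ≤ ((if i₁ then w₁ + 1 else w₁ : Nat) : Int) := by
      rw [hm1]; simpa using hcond
    rw [if_pos hA]
    have h2 := hm2 (by simpa using hcond)
    have heq1 := congrArg Prod.fst h2
    have heq2 := congrArg Prod.snd h2
    simp only at heq1 heq2
    rw [if_neg (by omega : ¬ ((S.length : Int) < max n 0))]
    rw [← Int.toNat_eq_max]
    by_cases hlt : ((n.toNat : Nat) : Int) < (S.length : Int)
    · -- offset = starts[n]
      have hidx : n.toNat < S.length := by exact_mod_cast hlt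
      rw [if_pos hlt]
      have hget : PySem.List.pyGet? (List.map (fun k : Nat => (k : Int)) S) ((n.toNat : Nat) : Int)
          = some ((S[n.toNat] : Int)) := by
        rw [PySem.List.pyGet?_natCast, List.getElem?_map, List.getElem?_eq_getElem hidx]
        rfl
      rw [hget]
      simp only [Option.getD_some]
      rw [List.getD_eq_getElem S _ hidx] at heq1 heq2
      rw [PySem.List.slice_from_natCast]
      rw [← heq1, ← heq2]
    · -- offset = len(text)
      rw [if_neg hlt]
      have hge : S.length ≤ n.toNat := by exact_mod_cast not_lt.mp hlt
      rw [List.getD_eq_getElem?_getD, List.getElem?_eq_none (by omega),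
        Option.getD_none] at heq1 heq2
      rw [show ((text.toList.length : Nat) : Int) = ((text.toList.length : Nat) : Int) from rfl,
        PySem.List.slice_from_natCast]
      rw [← heq1, ← heq2]
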